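-- pv_equiv track=rewrite | github.com/nainseok/korean-word-search | word_search.py | search
-- ===== SOURCE A (Python) =====
-- def search(query, txt):
--     if not query:
--         return -1
--     search_list = []
--     for line in txt:
--         word = line.rstrip()
--         if len(query) != len(word):
--             continue
--         is_match = True
--         for i in range(len(query)):
--             if query[i] != '?' and query[i] != word[i]:
--                 is_match = False
--                 break
--         if is_match:
--             search_list.append(word)
--     return search_list
-- ===== SOURCE B (Python) =====
-- def _match(q, w):
--     # recursive simultaneous descent: length equality falls out of the recursion
--     if not q and not w:
--         return True
--     if not q or not w:
--         return False
--     return (q[0] == '?' or q[0] == w[0]) and _match(q[1:], w[1:])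
--
--
-- def search(query, txt):
--     if not query:
--         return -1
--     return [w for w in (line.rstrip() for line in txt) if _match(query, w)]
-- ===== Notes on version B (the rewrite author's own statement) =====
-- stated objective: simpler
-- what changed: Replaces the explicit accumulator loop with a length guard, boolean flag, break and index loop by a list comprehension over rstripped lines filtered by a recursive two-string matcher whose simultaneous descent subsumes the length check.
-- outside the precondition, e.g. on search('', ['abc']): A returns -1, B returns -1
import Mathlib
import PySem

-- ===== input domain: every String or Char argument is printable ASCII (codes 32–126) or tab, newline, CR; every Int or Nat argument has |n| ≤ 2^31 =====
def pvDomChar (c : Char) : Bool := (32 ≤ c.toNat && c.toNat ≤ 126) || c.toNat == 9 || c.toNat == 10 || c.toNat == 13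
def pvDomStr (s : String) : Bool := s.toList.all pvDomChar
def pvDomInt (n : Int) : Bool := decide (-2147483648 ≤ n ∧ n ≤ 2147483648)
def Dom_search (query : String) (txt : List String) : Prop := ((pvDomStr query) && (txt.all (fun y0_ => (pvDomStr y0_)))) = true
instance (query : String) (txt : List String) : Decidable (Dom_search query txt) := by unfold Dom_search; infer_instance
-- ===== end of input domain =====

-- B is a simpler decomposition: comprehension + recursive matcher instead of index loop with flag/break.
-- (Equivalence proved on Pre_search: query nonempty; on empty query Python A returns -1, not a list.)

-- ===== PORT A =====
-- inner 'for i in range(len(query))' loop with its break (once False it exits; ported as recursion over the index list)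
def searchInnerA (q w : List Char) : List Int → Bool
  | [] => true
  | i :: rest =>
      if PySem.List.pyGetD q i ' ' ≠ '?' ∧ PySem.List.pyGetD q i ' ' ≠ PySem.List.pyGetD w i ' ' then
        false
      else searchInnerA q w rest

def search (query : String) (txt : List String) : List String :=
  -- Python returns -1 (not a list) on empty query; that input is outside Pre_search, the port returns []
  if query.toList = [] then []
  else
    txt.foldl (fun acc line =>
      let word := PySem.Str.rstrip line
      if PySem.Str.len query ≠ PySem.Str.len word then acc
      else if searchInnerA query.toList word.toList
                (PySem.List.pyRange 0 (PySem.Str.len query) 1) then acc ++ [word]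
      else acc) []

-- ===== PORT B =====
def searchMatchB : List Char → List Char → Bool
  | [], [] => true
  | _ :: _, [] => false
  | [], _ :: _ => false
  | q :: qs, w :: ws => (q == '?' || q == w) && searchMatchB qs ws

def search_alt (query : String) (txt : List String) : List String :=
  -- Python returns -1 (not a list) on empty query; outside Pre_search, the port returns []
  if query.toList = [] then []
  else (txt.map PySem.Str.rstrip).filter (fun w => searchMatchB query.toList w.toList)

-- ===== PRECONDITION & SPEC =====
-- Pre_ excludes only the empty query, on which Python A (and B) return -1, which is not a value of the declared list type.
def Pre_search (query : String) (txt : List String) : Prop := query.toList ≠ []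
instance (query : String) (txt : List String) : Decidable (Pre_search query txt) := by unfold Pre_search; infer_instance
def pvWitness_search : String × List String := ("a?c", ["abc", "xbc ", "ab"])

def Spec_search (query : String) (txt : List String) (out : List String) : Prop := out = search_alt query txt
instance (query : String) (txt : List String) (out : List String) : Decidable (Spec_search query txt out) := by unfold Spec_search; infer_instance

-- ===== CLAIM (what is proved, stated in full; the proofs are below) =====
def Claim_equal_search : Prop := ∀ (query : String) (txt : List String), Dom_search query txt → Pre_search query txt → Spec_search query txt (search query txt)

-- ===== LEMMAS AND PROOFS =====

-- the inner loop (with its break) is an 'all' over its index list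
theorem searchInnerA_eq_all (q w : List Char) (l : List Int) :
    searchInnerA q w l
      = l.all (fun i => !(PySem.List.pyGetD q i ' ' ≠ '?' ∧ PySem.List.pyGetD q i ' ' ≠ PySem.List.pyGetD w i ' ' : Bool)) := by
  induction l with
  | nil => rfl
  | cons i rest ih =>
      simp only [searchInnerA, List.all_cons]
      split_ifs with h <;> simp [h, ih]

-- the recursive matcher equals the length check plus the indexwise scan
theorem matchB_eq (q w : List Char) :
    searchMatchB q w
      = ((q.length == w.length)
          && (List.range q.length).all (fun i => (q.getD i ' ' == '?' || q.getD i ' ' == w.getD i ' '))) := by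
  induction q generalizing w with
  | nil => cases w <;> simp [searchMatchB]
  | cons c qs ih =>
      cases w with
      | nil => simp [searchMatchB]
      | cons d ws =>
          simp only [searchMatchB, List.length_cons, List.range_succ_eq_map, List.all_cons,
            List.all_map, Function.comp_def, List.getD_cons_zero, List.getD_cons_succ, ih ws]
          by_cases h : qs.length = ws.length <;> simp [h, Bool.and_left_comm]

-- A's combined per-word condition, as a Bool, is B's matcher
theorem line_eq (q w : List Char) :
    ((q.length == w.length) && searchInnerA q w (PySem.List.pyRange 0 (q.length : Int) 1))
      = searchMatchB q w := by
  rw [matchB_eq, searchInnerA_eq_all, PySem.List.pyRange_zero_natCast, List.all_map]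
  have hdec : ∀ a b : Char, decide (a = b) = (a == b) := by
    intro a b; by_cases h : a = b <;> simp [h]
  simp [Function.comp_def, hdec]

-- one step of A's accumulator loop, rewritten through line_eq
theorem step_eq (q : List Char) (word : String) (acc : List String) :
    (if (q.length : Int) ≠ (word.toList.length : Int) then acc
     else if searchInnerA q word.toList (PySem.List.pyRange 0 (q.length : Int) 1) = true then acc ++ [word]
     else acc)
      = (if searchMatchB q word.toList = true then acc ++ [word] else acc) := by
  rw [← line_eq q word.toList]
  by_cases h1 : q.length = word.toList.length
  · have h1' : ¬ ((q.length : Int) ≠ (word.toList.length : Int)) := by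
      simp [h1]
    simp [h1]
  · have h1' : (q.length : Int) ≠ (word.toList.length : Int) := by exact_mod_cast h1
    have h1s : ¬ (q.length = word.length) := fun hc => h1 (by simpa using hc)
    simp [h1s]

theorem fold_eq (q : List Char) (txt : List String) (acc : List String) :
    txt.foldl (fun acc line =>
        let word := PySem.Str.rstrip line
        if (q.length : Int) ≠ (word.toList.length : Int) then acc
        else if searchInnerA q word.toList (PySem.List.pyRange 0 (q.length : Int) 1) = true then acc ++ [word]
        else acc) acc
      = acc ++ (txt.map PySem.Str.rstrip).filter (fun w => searchMatchB q w.toList) := by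
  induction txt generalizing acc with
  | nil => simp
  | cons line rest ih =>
      simp only [List.foldl_cons, List.map_cons, List.filter_cons]
      rw [step_eq]
      by_cases hb : searchMatchB q (PySem.Str.rstrip line).toList = true
      · rw [if_pos hb, if_pos hb, ih, List.append_assoc, List.singleton_append]
      · rw [if_neg hb, if_neg hb, ih]

-- ===== VERDICT (by name: the statement is the Claim_ definition above) =====
theorem search_spec : Claim_equal_search := by
  intro query txt _ hpre
  unfold Spec_search search search_alt
  rw [if_neg hpre, if_neg hpre]
  have h := fold_eq query.toList txt []
  rw [List.nil_append] at h
  simpa only [PySem.Str.len_eq] using h
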